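-- pv_equiv track=rewrite | github.com/daalgi/algorithms | graphs/find_all_possible_recipes_from_given_supplies.py | bfs_iter
-- ===== SOURCE A (Python) =====
-- from typing import List
-- from collections import defaultdict, deque
--
-- def bfs_iter(
--     recipes: List[str], ingredients: List[List[str]], supplies: List[str]
-- ) -> List[str]:
--     # Time complexity: O(n)
--     # Space complexity: O(n)
--
--     # Solution with a graph mapping recipe -> ingredients
--     n = len(recipes)
--
--     supplies = set(supplies)
--
--     # Build an adjacency list:
--     # ingredient: [sub_ingredient1, sub_ingredient2, ...]
--     adj = defaultdict(list)
--     for i in range(n):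
--         for ingredient in ingredients[i]:
--             adj[recipes[i]].append(ingredient)
--
--     can_make = {ing: True for ing in supplies}
--
--     for recipe in recipes:
--
--         if recipe in can_make:
--             continue
--
--         q = deque([recipe])
--         contains_all = True
--         current_ingredients = set()
--         while q:
--
--             # Current ingredient
--             ingredient = q.popleft()
--
--             # Ingredient already seen previously
--             if ingredient in can_make:
--                 if can_make[ingredient]:
--                     continue
--                 contains_all = False
--                 break
--
--             if ingredient in current_ingredients:
--                 contains_all = False
--                 break
--             current_ingredients.add(ingredient)
--
--             # Check if `ingredient` is made of other ingredients
--             # or a basic ingredient in `supplies`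
--             if ingredient not in adj and ingredient not in supplies:
--                 # If not, the current `ingredient` can't be found
--                 # so the current `recipe` can't be made
--                 can_make[ingredient] = False
--                 contains_all = False
--                 break
--
--             for subing in adj[ingredient]:
--                 q.append(subing)
--
--         can_make[recipe] = contains_all
--
--     return [r for r in recipes if can_make[r]]
-- ===== SOURCE B (Python) =====
-- def bfs_iter(recipes, ingredients, supplies):
--     # Mutual-recursive solver over two result sets (good/bad) instead of A's
--     # per-recipe BFS queue over a single can_make dict; adjacency built by
--     # whole-list concatenation per (recipe, ingredients) pair.
--     adj = {}
--     for r, ings in zip(recipes, ingredients):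
--         adj[r] = adj.get(r, []) + list(ings)
--
--     good = set(supplies)
--     bad = set()
--
--     def solve(node, seen):
--         if node in good:
--             return True
--         if node in bad or node in seen:
--             return False
--         seen.add(node)
--         subs = adj.get(node)
--         if not subs:
--             bad.add(node)
--             return False
--         return all(solve(s, seen) for s in subs)
--
--     for r in recipes:
--         if r not in good and r not in bad:
--             (good if solve(r, set()) else bad).add(r)
--
--     return [r for r in recipes if r in good]
-- ===== Notes on version B (the rewrite author's own statement) =====
-- stated objective: alternative
-- what changed: A's per-recipe BFS over a deque with a single can_make dict is replaced by a pair of mutually recursive functions (solve over one node, all over its sub-ingredient list) threading two result sets good/bad, and the adjacency dict is built by per-recipe whole-list concatenation over zip instead of per-ingredient appends over indices.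
import Mathlib
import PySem

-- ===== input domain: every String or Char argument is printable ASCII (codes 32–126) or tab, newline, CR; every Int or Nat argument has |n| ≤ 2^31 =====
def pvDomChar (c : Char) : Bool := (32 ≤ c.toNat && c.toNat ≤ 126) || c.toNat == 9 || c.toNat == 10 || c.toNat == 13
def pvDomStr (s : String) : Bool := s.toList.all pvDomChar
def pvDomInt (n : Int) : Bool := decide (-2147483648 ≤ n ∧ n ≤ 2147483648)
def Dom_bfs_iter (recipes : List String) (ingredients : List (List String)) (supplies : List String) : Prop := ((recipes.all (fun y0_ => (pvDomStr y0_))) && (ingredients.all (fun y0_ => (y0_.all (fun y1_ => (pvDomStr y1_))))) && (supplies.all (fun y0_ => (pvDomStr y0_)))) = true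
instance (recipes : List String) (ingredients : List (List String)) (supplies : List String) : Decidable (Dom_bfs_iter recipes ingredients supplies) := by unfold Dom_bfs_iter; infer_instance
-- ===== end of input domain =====

-- B replaces A's per-recipe BFS (deque + one can_make dict) by two mutually recursive
-- functions over a pair of result sets good/bad (objective: alternative decomposition,
-- same asymptotic cost). Both ports use a fuel parameter only as a totality guard.

-- shared totality guard: a fuel amount provably larger than the number of steps any
-- per-recipe traversal can take (it is no part of either algorithm)
def pvFuel (adj : PySem.Dict String (List String)) (supLen : Nat) : Nat :=
  2 + (adj.keys.length + supLen) * ((adj.values.map List.length).sum + 1)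

-- ===== PORT A =====
-- adjacency dict: for i in range(n): for ing in ingredients[i]: adj[recipes[i]].append(ing)
-- (ingredients.getD i [] / recipes.getD i "" are exact for i < length; Pre_ gives
-- recipes.length ≤ ingredients.length, so every index is in range)
def adjA (recipes : List String) (ingredients : List (List String)) : PySem.Dict String (List String) :=
  (List.range recipes.length).foldl
    (fun d i => (ingredients.getD i []).foldl
      (fun d ing => d.insert (recipes.getD i "") (d.getD (recipes.getD i "") [] ++ [ing])) d)
    PySem.Dict.empty

-- A's inner `while q:` loop (deque popleft at the head, appends at the tail);
-- returns (contains_all, can_make).  The defaultdict read `adj[ingredient]` is ported as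
-- getD (exact here: the key-creating access is reachable only for a supply, and supplies
-- are already in can_make, so that access never happens).
def loopA (adj : PySem.Dict String (List String)) (sup : List String) :
    Nat → List String → PySem.Set String → PySem.Dict String Bool → Bool × PySem.Dict String Bool
  | 0, _, _, m => (true, m)
  | _+1, [], _, m => (true, m)
  | f+1, x :: q, cur, m =>
    match m.get? x with
    | some b => if b then loopA adj sup f q cur m else (false, m)
    | none =>
      if x ∈ cur then (false, m)
      else
        let cur' := PySem.Set.add cur x
        if adj.contains x = false ∧ x ∉ sup then (false, m.insert x false)
        else loopA adj sup f (q ++ adj.getD x []) cur' m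

def bfs_iter (recipes : List String) (ingredients : List (List String)) (supplies : List String) : List String :=
  let sup := PySem.Set.ofList supplies
  let adj := adjA recipes ingredients
  let canMake0 := sup.foldl (fun m s => m.insert s true) PySem.Dict.empty
  let fuel := pvFuel adj sup.length
  let canMake := recipes.foldl (fun m recipe =>
    if m.contains recipe then m
    else
      let p := loopA adj sup fuel [recipe] PySem.Set.empty m
      p.2.insert recipe p.1) canMake0
  recipes.filter (fun r => canMake.getD r false)

-- ===== PORT B =====
-- adjacency dict: for r, ings in zip(recipes, ingredients): adj[r] = adj.get(r, []) + list(ings)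
def adjB (recipes : List String) (ingredients : List (List String)) : PySem.Dict String (List String) :=
  (recipes.zip ingredients).foldl
    (fun d p => d.insert p.1 (d.getD p.1 [] ++ p.2))
    PySem.Dict.empty

-- B's mutually recursive `solve(node, seen)` and its `all(solve(s, seen) for s in subs)`
-- generator (short-circuiting); state = (result, bad, seen); good is fixed per call
mutual
def solveB (adj : PySem.Dict String (List String)) (good : PySem.Set String) :
    Nat → String → PySem.Set String → PySem.Set String →
      Bool × PySem.Set String × PySem.Set String
  | 0, _, bad, seen => (true, bad, seen)
  | f+1, node, bad, seen =>
    if node ∈ good then (true, bad, seen)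
    else if node ∈ bad ∨ node ∈ seen then (false, bad, seen)
    else
      let seen' := PySem.Set.add seen node
      match adj.get? node with
      | none => (false, PySem.Set.add bad node, seen')
      | some subs =>
        if subs = [] then (false, PySem.Set.add bad node, seen')
        else allB adj good f subs bad seen'
def allB (adj : PySem.Dict String (List String)) (good : PySem.Set String) :
    Nat → List String → PySem.Set String → PySem.Set String →
      Bool × PySem.Set String × PySem.Set String
  | 0, _, bad, seen => (true, bad, seen)
  | _+1, [], bad, seen => (true, bad, seen)
  | f+1, x :: rest, bad, seen =>
    match solveB adj good f x bad seen with
    | (true, bad', seen') => allB adj good f rest bad' seen'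
    | r => r
end

def bfs_iter_alt (recipes : List String) (ingredients : List (List String)) (supplies : List String) : List String :=
  let adj := adjB recipes ingredients
  let fuel := pvFuel adj supplies.length
  let gb := recipes.foldl (fun gb r =>
    if r ∉ gb.1 ∧ r ∉ gb.2 then
      let p := solveB adj gb.1 fuel r gb.2 PySem.Set.empty
      if p.1 then (PySem.Set.add gb.1 r, p.2.1) else (gb.1, PySem.Set.add p.2.1 r)
    else gb) (PySem.Set.ofList supplies, PySem.Set.empty)
  recipes.filter (fun r => PySem.Set.contains gb.1 r)

-- ===== PRECONDITION & SPEC =====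
-- Pre_ excludes exactly the inputs where A raises IndexError (ingredients[i] for
-- i < len(recipes) with ingredients shorter than recipes); A returns on everything else.
def Pre_bfs_iter (recipes : List String) (ingredients : List (List String)) (supplies : List String) : Prop :=
  recipes.length ≤ ingredients.length
instance (recipes : List String) (ingredients : List (List String)) (supplies : List String) : Decidable (Pre_bfs_iter recipes ingredients supplies) := by unfold Pre_bfs_iter; infer_instance

def pvWitness_bfs_iter : List String × List (List String) × List String :=
  (["a"], [["s"]], ["s"])


def Spec_bfs_iter (recipes : List String) (ingredients : List (List String)) (supplies : List String) (out : List String) : Prop := out = bfs_iter_alt recipes ingredients supplies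
instance (recipes : List String) (ingredients : List (List String)) (supplies : List String) (out : List String) : Decidable (Spec_bfs_iter recipes ingredients supplies out) := by unfold Spec_bfs_iter; infer_instance

-- ===== CLAIM (what is proved, stated in full; the proofs are below) =====
def Claim_equal_bfs_iter : Prop := ∀ (recipes : List String) (ingredients : List (List String)) (supplies : List String), Dom_bfs_iter recipes ingredients supplies → Pre_bfs_iter recipes ingredients supplies → Spec_bfs_iter recipes ingredients supplies (bfs_iter recipes ingredients supplies)

-- ===== LEMMAS AND PROOFS =====
-- What a node looks like to either traversal: immediately good, immediately bad,
-- or to be expanded into children.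
inductive PvStatus where
  | ok
  | fail
  | expand (cs : List String)
deriving DecidableEq

-- A's view: the can_make dict, the adjacency dict and the supplies
def statOf (adj : PySem.Dict String (List String)) (sup : List String)
    (m : PySem.Dict String Bool) (x : String) : PvStatus :=
  if m.get? x = some true then .ok
  else if m.get? x = some false then .fail
  else if adj.contains x then .expand (adj.getD x [])
  else if x ∈ sup then .expand []
  else .fail

-- B's view: the good/bad sets and B's adjacency dict
def statB (adj : PySem.Dict String (List String)) (good bad : List String) (x : String) : PvStatus :=
  if x ∈ good then .ok
  else if x ∈ bad then .fail
  else
    match adj.get? x with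
    | some subs => if subs = [] then .fail else .expand subs
    | none => .fail

-- A's queue loop over an abstract status function (no writes; writes never change statuses)
def bfsS (st : String → PvStatus) : Nat → List String → List String → Option Bool
  | 0, _, _ => none
  | _+1, [], _ => some true
  | f+1, x :: q, cur =>
    match st x with
    | .ok => bfsS st f q cur
    | .fail => some false
    | .expand cs => if x ∈ cur then some false else bfsS st f (q ++ cs) (x :: cur)

theorem bfsS_nil {st : String → PvStatus} {f : Nat} {cur : List String} :
    bfsS st (f + 1) [] cur = some true := rfl

theorem bfsS_ok {st : String → PvStatus} {f : Nat} {x : String} {q cur : List String}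
    (h : st x = .ok) : bfsS st (f + 1) (x :: q) cur = bfsS st f q cur := by
  rw [bfsS, h]

theorem bfsS_fail {st : String → PvStatus} {f : Nat} {x : String} {q cur : List String}
    (h : st x = .fail) : bfsS st (f + 1) (x :: q) cur = some false := by
  rw [bfsS, h]

theorem bfsS_expand {st : String → PvStatus} {f : Nat} {x : String} {q cur cs : List String}
    (h : st x = .expand cs) : bfsS st (f + 1) (x :: q) cur =
      if x ∈ cur then some false else bfsS st f (q ++ cs) (x :: cur) := by
  rw [bfsS, h]

-- B's solve/all over an abstract status function
mutual
def dM (st : String → PvStatus) : Nat → String → List String → Option (Bool × List String)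
  | 0, _, _ => none
  | f+1, x, vis =>
    match st x with
    | .ok => some (true, vis)
    | .fail => some (false, vis)
    | .expand cs => if x ∈ vis then some (false, vis) else aM st f cs (x :: vis)
def aM (st : String → PvStatus) : Nat → List String → List String → Option (Bool × List String)
  | 0, _, _ => none
  | _+1, [], vis => some (true, vis)
  | f+1, x :: rest, vis =>
    match dM st f x vis with
    | some (true, v) => aM st f rest v
    | r => r
end

theorem dM_zero {st : String → PvStatus} {x : String} {vis : List String} :
    dM st 0 x vis = none := by rw [dM]

theorem dM_ok {st : String → PvStatus} {f : Nat} {x : String} {vis : List String}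
    (h : st x = .ok) : dM st (f + 1) x vis = some (true, vis) := by rw [dM, h]

theorem dM_fail {st : String → PvStatus} {f : Nat} {x : String} {vis : List String}
    (h : st x = .fail) : dM st (f + 1) x vis = some (false, vis) := by rw [dM, h]

theorem dM_expand {st : String → PvStatus} {f : Nat} {x : String} {vis cs : List String}
    (h : st x = .expand cs) : dM st (f + 1) x vis =
      if x ∈ vis then some (false, vis) else aM st f cs (x :: vis) := by rw [dM, h]

theorem aM_zero {st : String → PvStatus} {l vis : List String} :
    aM st 0 l vis = none := by rw [aM]

theorem aM_nil {st : String → PvStatus} {f : Nat} {vis : List String} :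
    aM st (f + 1) [] vis = some (true, vis) := by rw [aM]

theorem aM_cons {st : String → PvStatus} {f : Nat} {x : String} {rest vis : List String} :
    aM st (f + 1) (x :: rest) vis =
      match dM st f x vis with
      | some (true, v) => aM st f rest v
      | r => r := by rw [aM]

-- The order-free certificate both traversals decide: a finite expansion forest of the
-- pending list, with its success bit and the list of expanded nodes.
inductive TreesP (st : String → PvStatus) : List String → Bool → List String → Prop where
  | nil : TreesP st [] true []
  | cons_ok {x rest b l} : st x = .ok → TreesP st rest b l → TreesP st (x :: rest) b l
  | cons_fail {x rest b l} : st x = .fail → TreesP st rest b l → TreesP st (x :: rest) false l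
  | cons_expand {x cs rest b1 l1 b2 l2} : st x = .expand cs → TreesP st cs b1 l1 →
      TreesP st rest b2 l2 → TreesP st (x :: rest) (b1 && b2) (x :: (l1 ++ l2))

theorem TreesP_nil_inv {st : String → PvStatus} {b : Bool} {l : List String}
    (h : TreesP st [] b l) : b = true ∧ l = [] := by
  cases h; exact ⟨rfl, rfl⟩

theorem TreesP_cons_inv {st : String → PvStatus} {x : String} {rest : List String} {b : Bool}
    {l : List String} (h : TreesP st (x :: rest) b l) :
    (st x = .ok ∧ TreesP st rest b l)
    ∨ (∃ b', st x = .fail ∧ b = false ∧ TreesP st rest b' l)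
    ∨ (∃ cs b1 l1 b2 l2, st x = .expand cs ∧ TreesP st cs b1 l1 ∧ TreesP st rest b2 l2 ∧
        b = (b1 && b2) ∧ l = x :: (l1 ++ l2)) := by
  cases h with
  | cons_ok hst h' => exact .inl ⟨hst, h'⟩
  | cons_fail hst h' => exact .inr (.inl ⟨_, hst, rfl, h'⟩)
  | cons_expand hst hcs hrest => exact .inr (.inr ⟨_, _, _, _, _, hst, hcs, hrest, rfl, rfl⟩)

theorem TreesP_append {st : String → PvStatus} {u v : List String} {b1 b2 : Bool}
    {l1 l2 : List String} (h1 : TreesP st u b1 l1) (h2 : TreesP st v b2 l2) :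
    TreesP st (u ++ v) (b1 && b2) (l1 ++ l2) := by
  induction h1 with
  | nil => simpa using h2
  | cons_ok hst _ ih => exact TreesP.cons_ok hst ih
  | cons_fail hst _ ih =>
    rw [Bool.false_and]
    exact TreesP.cons_fail hst ih
  | cons_expand hst hcs _ _ ih =>
    have h3 := TreesP.cons_expand hst hcs ih
    simpa [Bool.and_assoc, List.append_assoc] using h3

theorem TreesP_append_inv {st : String → PvStatus} {u v : List String} {b : Bool}
    {l : List String} (h : TreesP st (u ++ v) b l) :
    ∃ b1 l1 b2 l2, TreesP st u b1 l1 ∧ TreesP st v b2 l2 ∧ b = (b1 && b2) ∧ l = l1 ++ l2 := by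
  induction u generalizing b l with
  | nil => exact ⟨true, [], b, l, TreesP.nil, h, by simp, by simp⟩
  | cons x u' ih =>
    rw [List.cons_append] at h
    rcases TreesP_cons_inv h with ⟨hst, h'⟩ | ⟨b', hst, rfl, h'⟩ |
      ⟨cs, bc, lc, br, lr, hst, hcs, h', rfl, rfl⟩
    · obtain ⟨b1, l1, b2, l2, t1, t2, hb, hl⟩ := ih h'
      exact ⟨b1, l1, b2, l2, .cons_ok hst t1, t2, hb, hl⟩
    · obtain ⟨b1, l1, b2, l2, t1, t2, hb, hl⟩ := ih h'
      exact ⟨false, l1, b2, l2, .cons_fail hst t1, t2, by simp, hl⟩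
    · obtain ⟨b1, l1, b2, l2, t1, t2, hb, hl⟩ := ih h'
      refine ⟨bc && b1, x :: (lc ++ l1), b2, l2, .cons_expand hst hcs t1, t2, ?_, ?_⟩
      · rw [hb, Bool.and_assoc]
      · rw [hl]
        simp

-- forward/backward: A's BFS
theorem bfsS_true_forest {st : String → PvStatus} :
    ∀ (f : Nat) (q vis : List String), bfsS st f q vis = some true →
      ∃ l, TreesP st q true l ∧ l.Nodup ∧ ∀ x ∈ l, x ∉ vis := by
  intro f
  induction f with
  | zero => intro q vis h; simp [bfsS] at h
  | succ f ih =>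
    intro q vis h
    cases q with
    | nil => exact ⟨[], TreesP.nil, by simp, by simp⟩
    | cons x q =>
      cases hst : st x with
      | ok =>
        rw [bfsS_ok hst] at h
        obtain ⟨l, t, nd, dis⟩ := ih q vis h
        exact ⟨l, .cons_ok hst t, nd, dis⟩
      | fail => rw [bfsS_fail hst] at h; simp at h
      | expand cs =>
        rw [bfsS_expand hst] at h
        by_cases hx : x ∈ vis
        · rw [if_pos hx] at h; simp at h
        · rw [if_neg hx] at h
          obtain ⟨l', t', nd', dis'⟩ := ih _ _ h
          obtain ⟨b1, l1, b2, l2, tq, tcs, hb, hl⟩ := TreesP_append_inv t'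
          obtain ⟨hb1, hb2⟩ := Bool.and_eq_true _ _ |>.mp hb.symm
          subst hb1 hb2 hl
          have hx1 : x ∉ l1 ++ l2 := fun hm => (dis' x hm) List.mem_cons_self
          refine ⟨x :: (l2 ++ l1), ?_, ?_, ?_⟩
          · have h2 := TreesP.cons_expand hst tcs tq
            simpa using h2
          · refine List.Nodup.cons ?_ (List.perm_append_comm.nodup nd')
            intro hmem
            exact hx1 (by simpa [List.mem_append, or_comm] using hmem)
          · intro y hy
            rcases List.mem_cons.mp hy with rfl | hy'
            · exact hx
            · have hy2 : y ∈ l1 ++ l2 := by simpa [List.mem_append, or_comm] using hy'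
              intro hvis
              exact dis' y hy2 (List.mem_cons_of_mem _ hvis)

theorem forest_bfsS_true {st : String → PvStatus} :
    ∀ (f : Nat) (q vis l : List String) (b : Bool), TreesP st q true l → l.Nodup →
      (∀ x ∈ l, x ∉ vis) → bfsS st f q vis = some b → b = true := by
  intro f
  induction f with
  | zero => intro q vis l b _ _ _ h; simp [bfsS] at h
  | succ f ih =>
    intro q vis l b t nd dis h
    cases q with
    | nil =>
      rw [bfsS_nil] at h
      injection h with h
      exact h.symm
    | cons x q =>
      rcases TreesP_cons_inv t with ⟨hst, t'⟩ | ⟨b', hst, hb, _⟩ |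
        ⟨cs, bc, lc, br, lr, hst, tcs, tq, hb, hl⟩
      · rw [bfsS_ok hst] at h
        exact ih q vis l b t' nd dis h
      · exact absurd hb.symm (by simp)
      · obtain ⟨hbc, hbr⟩ := Bool.and_eq_true _ _ |>.mp hb.symm
        subst hbc hbr hl
        have hxl : x ∉ lc ++ lr := (List.nodup_cons.mp nd).1
        have hxvis : x ∉ vis := dis x List.mem_cons_self
        rw [bfsS_expand hst, if_neg hxvis] at h
        refine ih (q ++ cs) (x :: vis) (lr ++ lc) b ?_ ?_ ?_ h
        · have h2 := TreesP_append tq tcs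
          simpa using h2
        · exact List.perm_append_comm.nodup ((List.nodup_cons.mp nd).2)
        · intro y hy
          have hy2 : y ∈ lc ++ lr := by simpa [List.mem_append, or_comm] using hy
          intro hmem
          rcases List.mem_cons.mp hmem with rfl | hmem'
          · exact hxl hy2
          · exact dis y (List.mem_cons_of_mem _ hy2) hmem'

-- forward/backward: B's DFS (mutual solve/all)
theorem dM_aM_true_forest {st : String → PvStatus} :
    ∀ f : Nat,
      (∀ (x : String) (vis v : List String), dM st f x vis = some (true, v) →
        ∃ l, TreesP st [x] true l ∧ l.Nodup ∧ (∀ y ∈ l, y ∉ vis) ∧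
          (∀ y, y ∈ v ↔ y ∈ l ∨ y ∈ vis)) ∧
      (∀ (q vis v : List String), aM st f q vis = some (true, v) →
        ∃ l, TreesP st q true l ∧ l.Nodup ∧ (∀ y ∈ l, y ∉ vis) ∧
          (∀ y, y ∈ v ↔ y ∈ l ∨ y ∈ vis)) := by
  intro f
  induction f with
  | zero =>
    constructor
    · intro x vis v h; rw [dM_zero] at h; cases h
    · intro q vis v h; rw [aM_zero] at h; cases h
  | succ f ih =>
    obtain ⟨ihd, iha⟩ := ih
    constructor
    · intro x vis v h
      cases hst : st x with
      | ok =>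
        rw [dM_ok hst] at h
        injection h with h
        rw [Prod.mk.injEq] at h
        obtain ⟨-, rfl⟩ := h
        refine ⟨[], ?_, by simp, by simp, by simp⟩
        exact TreesP.cons_ok hst TreesP.nil
      | fail => rw [dM_fail hst] at h; simp at h
      | expand cs =>
        rw [dM_expand hst] at h
        by_cases hx : x ∈ vis
        · rw [if_pos hx] at h; simp at h
        · rw [if_neg hx] at h
          obtain ⟨lc, tc, ndc, disc, hvc⟩ := iha cs (x :: vis) v h
          refine ⟨x :: lc, ?_, ?_, ?_, ?_⟩
          · have h2 := TreesP.cons_expand hst tc TreesP.nil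
            simpa using h2
          · exact List.nodup_cons.mpr ⟨fun hm => disc x hm List.mem_cons_self, ndc⟩
          · intro y hy
            rcases List.mem_cons.mp hy with rfl | hy'
            · exact hx
            · exact fun hv => disc y hy' (List.mem_cons_of_mem _ hv)
          · intro y
            rw [hvc y]
            simp only [List.mem_cons]
            tauto
    · intro q vis v h
      cases q with
      | nil =>
        rw [aM_nil] at h
        injection h with h
        rw [Prod.mk.injEq] at h
        obtain ⟨-, rfl⟩ := h
        exact ⟨[], TreesP.nil, by simp, by simp, by simp⟩
      | cons x rest =>
        rw [aM_cons] at h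
        rcases hd : dM st f x vis with _ | ⟨b1, v1⟩
        · rw [hd] at h; simp at h
        · rw [hd] at h
          cases b1 with
          | false => simp at h
          | true =>
            simp only at h
            obtain ⟨l1, t1, nd1, dis1, hv1⟩ := ihd x vis v1 hd
            obtain ⟨l2, t2, nd2, dis2, hv2⟩ := iha rest v1 v h
            have tall := TreesP_append t1 t2
            refine ⟨l1 ++ l2, by simpa using tall, ?_, ?_, ?_⟩
            · refine List.Nodup.append nd1 nd2 ?_
              intro y hy1 hy2
              exact dis2 y hy2 ((hv1 y).mpr (.inl hy1))
            · intro y hy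
              rcases List.mem_append.mp hy with hm | hm
              · exact dis1 y hm
              · exact fun hv => dis2 y hm ((hv1 y).mpr (.inr hv))
            · intro y
              rw [hv2 y, hv1 y]
              simp only [List.mem_append]
              tauto

theorem forest_dM_aM_true {st : String → PvStatus} :
    ∀ f : Nat,
      (∀ (x : String) (vis l : List String) (b : Bool) (v : List String),
        TreesP st [x] true l → l.Nodup → (∀ y ∈ l, y ∉ vis) →
        dM st f x vis = some (b, v) → b = true ∧ (∀ y, y ∈ v ↔ y ∈ l ∨ y ∈ vis)) ∧
      (∀ (q vis l : List String) (b : Bool) (v : List String),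
        TreesP st q true l → l.Nodup → (∀ y ∈ l, y ∉ vis) →
        aM st f q vis = some (b, v) → b = true ∧ (∀ y, y ∈ v ↔ y ∈ l ∨ y ∈ vis)) := by
  intro f
  induction f with
  | zero =>
    constructor
    · intro x vis l b v _ _ _ h; rw [dM_zero] at h; cases h
    · intro q vis l b v _ _ _ h; rw [aM_zero] at h; cases h
  | succ f ih =>
    obtain ⟨ihd, iha⟩ := ih
    constructor
    · intro x vis l b v t nd dis h
      rcases TreesP_cons_inv t with ⟨hst, t'⟩ | ⟨b', hst, hb, _⟩ |
        ⟨cs, bc, lc, br, lr, hst, tcs, tq, hbeq, hleq⟩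
      · obtain ⟨-, rfl⟩ := TreesP_nil_inv t'
        rw [dM_ok hst] at h
        injection h with h
        rw [Prod.mk.injEq] at h
        obtain ⟨hb, hv⟩ := h
        exact ⟨hb.symm, by rw [← hv]; simp⟩
      · exact absurd hb.symm (by simp)
      · obtain ⟨hbr, hlr⟩ := TreesP_nil_inv tq
        subst hlr
        have hbc : bc = true := by rw [hbr] at hbeq; simpa using hbeq.symm
        subst hbc
        subst hleq
        rw [dM_expand hst] at h
        have hxvis : x ∉ vis := dis x (by simp)
        rw [if_neg hxvis] at h
        have hnd : lc.Nodup := by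
          rw [List.nodup_cons] at nd
          simpa using nd.2
        have hxlc : x ∉ lc := by
          rw [List.nodup_cons] at nd
          simpa using nd.1
        have hdisc : ∀ y ∈ lc, y ∉ x :: vis := by
          intro y hy
          simp only [List.mem_cons]
          rintro (rfl | hm)
          · exact hxlc hy
          · exact dis y (by simp [hy]) hm
        obtain ⟨hb, hv⟩ := iha cs (x :: vis) lc b v tcs hnd hdisc h
        refine ⟨hb, fun y => ?_⟩
        rw [hv y]
        simp only [List.mem_cons, List.mem_append, List.not_mem_nil, or_false]
        tauto
    · intro q vis l b v t nd dis h
      cases q with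
      | nil =>
        obtain ⟨-, rfl⟩ := TreesP_nil_inv t
        rw [aM_nil] at h
        injection h with h
        rw [Prod.mk.injEq] at h
        obtain ⟨hb, hv⟩ := h
        exact ⟨hb.symm, by rw [← hv]; simp⟩
      | cons x rest =>
        have t' : TreesP st ([x] ++ rest) true l := by simpa using t
        obtain ⟨b1, l1, b2, l2, t1, t2, hbeq, hleq⟩ := TreesP_append_inv t'
        obtain ⟨hb1, hb2⟩ := Bool.and_eq_true _ _ |>.mp hbeq.symm
        subst hb1 hb2 hleq
        rw [aM_cons] at h
        rcases hd : dM st f x vis with _ | ⟨bb, v1⟩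
        · rw [hd] at h; simp at h
        · rw [hd] at h
          have hnd1 : l1.Nodup := nd.of_append_left
          obtain ⟨hbb, hv1⟩ := ihd x vis l1 bb v1 t1 hnd1
            (fun y hy => dis y (List.mem_append.mpr (.inl hy))) hd
          subst hbb
          simp only at h
          have hnd2 : l2.Nodup := nd.of_append_right
          have hdis2 : ∀ y ∈ l2, y ∉ v1 := by
            intro y hy hv
            rcases (hv1 y).mp hv with hm | hm
            · exact (List.disjoint_of_nodup_append nd) hm hy
            · exact dis y (List.mem_append.mpr (.inr hy)) hm
          obtain ⟨hb, hv2⟩ := iha rest v1 l2 b v t2 hnd2 hdis2 h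
          refine ⟨hb, fun y => ?_⟩
          rw [hv2 y, hv1 y]
          simp only [List.mem_append]
          tauto

-- the per-recipe core: with any sufficient fuels, A's BFS and B's DFS decide the same bit
theorem bfs_eq_dM {st : String → PvStatus} {f1 f2 : Nat} {r : String} {b1 b2 : Bool}
    {v : List String} (hb : bfsS st f1 [r] [] = some b1)
    (hd : dM st f2 r [] = some (b2, v)) : b1 = b2 := by
  cases b1 with
  | true =>
    obtain ⟨l, t, nd, dis⟩ := bfsS_true_forest f1 [r] [] hb
    exact ((forest_dM_aM_true f2).1 r [] l b2 v t nd (by simp) hd).1.symm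
  | false =>
    cases b2 with
    | false => rfl
    | true =>
      obtain ⟨l, t, nd, dis, -⟩ := (dM_aM_true_forest f2).1 r [] v hd
      exact absurd (forest_bfsS_true f1 [r] [] l false t nd (by simp) hb) (by simp)

-- fuel sufficiency -------------------------------------------------------------
def isExp : PvStatus → Bool
  | .expand _ => true
  | _ => false

def Kexp (st : String → PvStatus) (U : List String) (vis : List String) : Nat :=
  (U.toFinset.filter (fun u => u ∉ vis ∧ isExp (st u) = true)).card

theorem Kexp_mono {st : String → PvStatus} {U vis vis' : List String}
    (h : ∀ y ∈ vis, y ∈ vis') : Kexp st U vis' ≤ Kexp st U vis := by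
  apply Finset.card_le_card
  intro u hu
  rw [Finset.mem_filter] at hu ⊢
  exact ⟨hu.1, fun hm => hu.2.1 (h u hm), hu.2.2⟩

theorem Kexp_lt {st : String → PvStatus} {U vis : List String} {x : String}
    (hx : x ∈ U) (hv : x ∉ vis) (he : isExp (st x) = true) :
    Kexp st U (x :: vis) < Kexp st U vis := by
  apply Finset.card_lt_card
  rw [Finset.ssubset_def]
  constructor
  · intro u hu
    rw [Finset.mem_filter] at hu ⊢
    exact ⟨hu.1, fun hm => hu.2.1 (List.mem_cons_of_mem _ hm), hu.2.2⟩
  · intro hsub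
    have hxmem : x ∈ U.toFinset.filter (fun u => u ∉ vis ∧ isExp (st u) = true) := by
      rw [Finset.mem_filter]
      exact ⟨List.mem_toFinset.mpr hx, hv, he⟩
    have := hsub hxmem
    rw [Finset.mem_filter] at this
    exact this.2.1 List.mem_cons_self

theorem bfsS_suff {st : String → PvStatus} {U : List String} {C : Nat}
    (hU : ∀ x cs, st x = .expand cs → x ∈ U ∧ cs.length ≤ C) :
    ∀ (f : Nat) (q vis : List String), q.length + Kexp st U vis * (C + 1) < f →
      (bfsS st f q vis).isSome := by
  intro f
  induction f with
  | zero => intro q vis h; omega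
  | succ f ih =>
    intro q vis h
    cases q with
    | nil => rw [bfsS_nil]; rfl
    | cons x q =>
      cases hst : st x with
      | ok =>
        rw [bfsS_ok hst]
        apply ih
        simp only [List.length_cons] at h
        omega
      | fail => rw [bfsS_fail hst]; rfl
      | expand cs =>
        rw [bfsS_expand hst]
        by_cases hx : x ∈ vis
        · rw [if_pos hx]; rfl
        · rw [if_neg hx]
          obtain ⟨hxU, hcs⟩ := hU x cs hst
          have hlt : Kexp st U (x :: vis) < Kexp st U vis :=
            Kexp_lt hxU hx (by rw [hst]; rfl)
          apply ih
          have hmul : (Kexp st U (x :: vis) + 1) * (C + 1) ≤ Kexp st U vis * (C + 1) :=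
            Nat.mul_le_mul_right _ hlt
          rw [Nat.add_mul, Nat.one_mul] at hmul
          simp only [List.length_cons, List.length_append] at h ⊢
          omega

theorem dM_aM_vis_mono {st : String → PvStatus} :
    ∀ f : Nat,
      (∀ (x : String) (vis : List String) (b : Bool) (v : List String),
        dM st f x vis = some (b, v) → ∀ y ∈ vis, y ∈ v) ∧
      (∀ (l vis : List String) (b : Bool) (v : List String),
        aM st f l vis = some (b, v) → ∀ y ∈ vis, y ∈ v) := by
  intro f
  induction f with
  | zero =>
    constructor
    · intro x vis b v h; rw [dM_zero] at h; cases h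
    · intro l vis b v h; rw [aM_zero] at h; cases h
  | succ f ih =>
    obtain ⟨ihd, iha⟩ := ih
    constructor
    · intro x vis b v h
      cases hst : st x with
      | ok =>
        rw [dM_ok hst] at h
        injection h with h
        rw [Prod.mk.injEq] at h
        obtain ⟨-, rfl⟩ := h
        exact fun y hy => hy
      | fail =>
        rw [dM_fail hst] at h
        injection h with h
        rw [Prod.mk.injEq] at h
        obtain ⟨-, rfl⟩ := h
        exact fun y hy => hy
      | expand cs =>
        rw [dM_expand hst] at h
        by_cases hx : x ∈ vis
        · rw [if_pos hx] at h
          injection h with h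
          rw [Prod.mk.injEq] at h
          obtain ⟨-, rfl⟩ := h
          exact fun y hy => hy
        · rw [if_neg hx] at h
          exact fun y hy => iha cs (x :: vis) b v h y (List.mem_cons_of_mem _ hy)
    · intro l vis b v h
      cases l with
      | nil =>
        rw [aM_nil] at h
        injection h with h
        rw [Prod.mk.injEq] at h
        obtain ⟨-, rfl⟩ := h
        exact fun y hy => hy
      | cons x rest =>
        rw [aM_cons] at h
        rcases hd : dM st f x vis with _ | ⟨b1, v1⟩
        · rw [hd] at h; cases h
        · rw [hd] at h
          have h1 : ∀ y ∈ vis, y ∈ v1 := ihd x vis b1 v1 hd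
          cases b1 with
          | true =>
            simp only at h
            exact fun y hy => iha rest v1 b v h y (h1 y hy)
          | false =>
            simp only at h
            injection h with h
            rw [Prod.mk.injEq] at h
            obtain ⟨-, rfl⟩ := h
            exact h1

theorem dM_aM_suff {st : String → PvStatus} {U : List String} {C : Nat}
    (hU : ∀ x cs, st x = .expand cs → x ∈ U ∧ cs.length ≤ C) :
    ∀ f : Nat,
      (∀ (x : String) (vis : List String), Kexp st U vis * (C + 1) + 1 ≤ f →
        (dM st f x vis).isSome) ∧
      (∀ (l vis : List String), Kexp st U vis * (C + 1) + l.length + 1 ≤ f →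
        (aM st f l vis).isSome) := by
  intro f
  induction f with
  | zero =>
    constructor
    · intro x vis h; omega
    · intro l vis h; omega
  | succ f ih =>
    obtain ⟨ihd, iha⟩ := ih
    constructor
    · intro x vis h
      cases hst : st x with
      | ok => rw [dM_ok hst]; rfl
      | fail => rw [dM_fail hst]; rfl
      | expand cs =>
        rw [dM_expand hst]
        by_cases hx : x ∈ vis
        · rw [if_pos hx]; rfl
        · rw [if_neg hx]
          obtain ⟨hxU, hcs⟩ := hU x cs hst
          have hlt : Kexp st U (x :: vis) < Kexp st U vis :=
            Kexp_lt hxU hx (by rw [hst]; rfl)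
          apply iha
          have hmul : (Kexp st U (x :: vis) + 1) * (C + 1) ≤ Kexp st U vis * (C + 1) :=
            Nat.mul_le_mul_right _ hlt
          rw [Nat.add_mul, Nat.one_mul] at hmul
          omega
    · intro l vis h
      cases l with
      | nil => rw [aM_nil]; rfl
      | cons x rest =>
        rw [aM_cons]
        have hx : (dM st f x vis).isSome := by
          apply ihd
          simp only [List.length_cons] at h
          omega
        rcases hd : dM st f x vis with _ | ⟨b1, v1⟩
        · rw [hd] at hx; simp at hx
        · cases b1 with
          | false => simp
          | true =>
            simp only
            apply iha
            have hmono : Kexp st U v1 ≤ Kexp st U vis :=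
              Kexp_mono ((dM_aM_vis_mono f).1 x vis true v1 hd)
            have hmul := Nat.mul_le_mul_right (C + 1) hmono
            simp only [List.length_cons] at h
            omega

-- statuses: branch lemmas -------------------------------------------------------
theorem stat_ok_of_get {adj : PySem.Dict String (List String)} {sup : List String}
    {m : PySem.Dict String Bool} {x : String} (h : m.get? x = some true) :
    statOf adj sup m x = .ok := by
  simp [statOf, h]

theorem stat_fail_of_get {adj : PySem.Dict String (List String)} {sup : List String}
    {m : PySem.Dict String Bool} {x : String} (h : m.get? x = some false) :
    statOf adj sup m x = .fail := by
  simp [statOf, h]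

theorem stat_none_eq {adj : PySem.Dict String (List String)} {sup : List String}
    {m : PySem.Dict String Bool} {x : String} (h : m.get? x = none) :
    statOf adj sup m x =
      (if adj.contains x then .expand (adj.getD x [])
       else if x ∈ sup then .expand []
       else .fail) := by
  simp [statOf, h]

theorem statOf_insert_of_ne {adj : PySem.Dict String (List String)} {sup : List String}
    {m : PySem.Dict String Bool} {r x : String} (b : Bool) (hx : x ≠ r) :
    statOf adj sup (m.insert r b) x = statOf adj sup m x := by
  unfold statOf
  rw [PySem.Dict.get?_insert_of_ne _ _ hx]

theorem statOf_insert_false_missing {adj : PySem.Dict String (List String)} {sup : List String}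
    {m : PySem.Dict String Bool} {r : String} (h1 : adj.contains r = false) (h2 : r ∉ sup)
    (h3 : m.get? r = none) :
    ∀ x, statOf adj sup (m.insert r false) x = statOf adj sup m x := by
  intro x
  by_cases hx : x = r
  · subst hx
    unfold statOf
    rw [PySem.Dict.get?_insert_self, h3]
    simp [h1, h2]
  · exact statOf_insert_of_ne _ hx

theorem statB_of_good {adj : PySem.Dict String (List String)} {good bad : List String}
    {x : String} (hg : x ∈ good) : statB adj good bad x = .ok := by
  simp [statB, hg]

theorem statB_of_bad {adj : PySem.Dict String (List String)} {good bad : List String}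
    {x : String} (hg : x ∉ good) (hb : x ∈ bad) : statB adj good bad x = .fail := by
  simp [statB, hg, hb]

theorem statB_of_none {adj : PySem.Dict String (List String)} {good bad : List String}
    {x : String} (hg : x ∉ good) (hb : x ∉ bad) (hA : adj.get? x = none) :
    statB adj good bad x = .fail := by
  simp [statB, hg, hb, hA]

theorem statB_of_nil {adj : PySem.Dict String (List String)} {good bad : List String}
    {x : String} (hg : x ∉ good) (hb : x ∉ bad) (hA : adj.get? x = some []) :
    statB adj good bad x = .fail := by
  simp [statB, hg, hb, hA]

theorem statB_of_subs {adj : PySem.Dict String (List String)} {good bad : List String}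
    {x : String} {subs : List String} (hg : x ∉ good) (hb : x ∉ bad)
    (hA : adj.get? x = some subs) (hs : subs ≠ []) :
    statB adj good bad x = .expand subs := by
  simp [statB, hg, hb, hA, hs]

theorem statB_ok_iff {adj : PySem.Dict String (List String)} {good bad : List String}
    {x : String} : statB adj good bad x = .ok ↔ x ∈ good := by
  constructor
  · intro h
    by_contra hg
    by_cases hb : x ∈ bad
    · rw [statB_of_bad hg hb] at h; cases h
    · rcases hA : adj.get? x with _ | subs
      · rw [statB_of_none hg hb hA] at h; cases h
      · by_cases hs : subs = []
        · subst hs; rw [statB_of_nil hg hb hA] at h; cases h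
        · rw [statB_of_subs hg hb hA hs] at h; cases h
  · exact statB_of_good

theorem statB_add_bad_ne {adj : PySem.Dict String (List String)} {good bad : List String}
    {r y : String} (hy : y ≠ r) :
    statB adj good (PySem.Set.add bad r) y = statB adj good bad y := by
  unfold statB
  simp [PySem.Set.mem_add, hy]

theorem statB_add_good_ne {adj : PySem.Dict String (List String)} {good bad : List String}
    {r y : String} (hy : y ≠ r) :
    statB adj (PySem.Set.add good r) bad y = statB adj good bad y := by
  unfold statB
  simp [PySem.Set.mem_add, hy]

theorem statB_add_bad_fail {adj : PySem.Dict String (List String)} {good bad : List String}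
    {x : String} (hg : x ∉ good) (h : statB adj good bad x = .fail) :
    ∀ y, statB adj good (PySem.Set.add bad x) y = statB adj good bad y := by
  intro y
  by_cases hy : y = x
  · subst hy
    rw [h, statB_of_bad hg ((PySem.Set.mem_add _ _ _).mpr (Or.inr rfl))]
  · exact statB_add_bad_ne hy

theorem statB_fail_cases {adj : PySem.Dict String (List String)} {good bad : List String}
    {x : String} (hg : x ∉ good) (hb : x ∉ bad) (h : statB adj good bad x = .fail) :
    adj.get? x = none ∨ adj.get? x = some [] := by
  rcases hA : adj.get? x with _ | l
  · exact .inl rfl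
  · by_cases hl : l = []
    · subst hl
      exact .inr rfl
    · exfalso
      rw [statB_of_subs hg hb hA hl] at h
      cases h

-- expansion bounds for fuel sufficiency
theorem statOf_hU {adj : PySem.Dict String (List String)} {sup : List String}
    {m : PySem.Dict String Bool} {x : String} {cs : List String}
    (h : statOf adj sup m x = .expand cs) :
    x ∈ adj.keys ++ sup ∧ cs.length ≤ (adj.values.map List.length).sum := by
  unfold statOf at h
  split_ifs at h with h1 h2 h3 h4
  · injection h with h
    subst h
    have hsome : (adj.get? x).isSome := by
      rw [← PySem.Dict.contains_eq_isSome_get?, h3]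
    obtain ⟨v, hv⟩ := Option.isSome_iff_exists.mp hsome
    have hgd : adj.getD x [] = v := PySem.Dict.getD_of_get?_eq_some _ _ hv
    rw [hgd]
    constructor
    · refine List.mem_append.mpr (.inl ?_)
      have hdec : decide (x ∈ adj.keys) = true := by
        rw [← PySem.Dict.contains_eq_decide_mem_keys]
        exact h3
      exact of_decide_eq_true hdec
    · have hmemv : v ∈ adj.values := by
        have hit := PySem.Dict.mem_items_of_get?_eq_some _ hv
        exact List.mem_map.mpr ⟨(x, v), hit, rfl⟩
      exact List.single_le_sum (fun a _ => Nat.zero_le a) _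
        (List.mem_map.mpr ⟨v, hmemv, rfl⟩)
  · injection h with h
    subst h
    exact ⟨List.mem_append.mpr (.inr h4), Nat.zero_le _⟩

theorem statB_hU {adj : PySem.Dict String (List String)} {good bad : List String}
    {x : String} {cs : List String} (h : statB adj good bad x = .expand cs) :
    x ∈ adj.keys ∧ cs.length ≤ (adj.values.map List.length).sum := by
  by_cases hg : x ∈ good
  · rw [statB_of_good hg] at h; cases h
  · by_cases hb : x ∈ bad
    · rw [statB_of_bad hg hb] at h; cases h
    · rcases hA : adj.get? x with _ | subs
      · rw [statB_of_none hg hb hA] at h; cases h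
      · by_cases hs : subs = []
        · subst hs
          rw [statB_of_nil hg hb hA] at h; cases h
        · rw [statB_of_subs hg hb hA hs] at h
          injection h with h
          rw [← h]
          constructor
          · have hdec : decide (x ∈ adj.keys) = true := by
              rw [← PySem.Dict.contains_eq_decide_mem_keys,
                PySem.Dict.contains_eq_isSome_get?, hA]
              rfl
            exact of_decide_eq_true hdec
          · have hmemv : subs ∈ adj.values := by
              have hit := PySem.Dict.mem_items_of_get?_eq_some _ hA
              exact List.mem_map.mpr ⟨(x, subs), hit, rfl⟩
            exact List.single_le_sum (fun a _ => Nat.zero_le a) _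
              (List.mem_map.mpr ⟨subs, hmemv, rfl⟩)

theorem fuel_bound (adj : PySem.Dict String (List String)) (sup : List String)
    (st : String → PvStatus) :
    1 + Kexp st (adj.keys ++ sup) [] * ((adj.values.map List.length).sum + 1) <
      pvFuel adj sup.length := by
  unfold pvFuel
  have h1 : Kexp st (adj.keys ++ sup) [] ≤ (adj.keys ++ sup).toFinset.card :=
    Finset.card_filter_le _ _
  have h2 : (adj.keys ++ sup).toFinset.card ≤ (adj.keys ++ sup).length :=
    List.toFinset_card_le _
  have h3 : (adj.keys ++ sup).length = adj.keys.length + sup.length := List.length_append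
  have h5 : Kexp st (adj.keys ++ sup) [] ≤ adj.keys.length + sup.length := by omega
  have h4 := Nat.mul_le_mul_right ((adj.values.map List.length).sum + 1) h5
  omega

theorem fuel_bound_B (adj : PySem.Dict String (List String)) (supLen : Nat)
    (st : String → PvStatus) :
    Kexp st adj.keys [] * ((adj.values.map List.length).sum + 1) + 1 <
      pvFuel adj supLen := by
  unfold pvFuel
  have h1 : Kexp st adj.keys [] ≤ adj.keys.toFinset.card :=
    Finset.card_filter_le _ _
  have h2 : adj.keys.toFinset.card ≤ adj.keys.length := List.toFinset_card_le _
  have h5 : Kexp st adj.keys [] ≤ adj.keys.length + supLen := by omega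
  have h4 := Nat.mul_le_mul_right ((adj.values.map List.length).sum + 1) h5
  omega

-- port A computes the abstract BFS -----------------------------------------------
theorem loopA_abs (adj : PySem.Dict String (List String)) (sup : List String) :
    ∀ (f : Nat) (q : List String) (cur acur : List String) (m : PySem.Dict String Bool),
      (∀ y, y ∈ cur ↔ y ∈ acur) →
      (∀ x, statOf adj sup (loopA adj sup f q cur m).2 x = statOf adj sup m x) ∧
      (∀ b, bfsS (statOf adj sup m) f q acur = some b → (loopA adj sup f q cur m).1 = b) := by
  intro f
  induction f with
  | zero =>
    intro q cur acur m _
    exact ⟨fun x => rfl, fun b hb => by simp [bfsS] at hb⟩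
  | succ f ih =>
    intro q cur acur m hequiv
    cases q with
    | nil =>
      refine ⟨fun x => rfl, fun b hb => ?_⟩
      rw [bfsS_nil] at hb
      have hb2 : b = true := by injection hb with hb; exact hb.symm
      rw [hb2]
      rfl
    | cons x q =>
      rcases hm : m.get? x with _ | b'
      · -- can_make has no entry for x
        cases hcont : adj.contains x with
        | true =>
          have hst : statOf adj sup m x = .expand (adj.getD x []) := by
            rw [stat_none_eq hm, if_pos hcont]
          by_cases hxc : x ∈ cur
          · have hxa : x ∈ acur := (hequiv x).mp hxc
            refine ⟨fun y => by simp [loopA, hm, hxc], fun b hb => ?_⟩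
            rw [bfsS_expand hst, if_pos hxa] at hb
            injection hb with hb
            rw [← hb]; simp [loopA, hm, hxc]
          · have hxa : x ∉ acur := fun hmem => hxc ((hequiv x).mpr hmem)
            have hred : loopA adj sup (f + 1) (x :: q) cur m =
                loopA adj sup f (q ++ adj.getD x []) (PySem.Set.add cur x) m := by
              simp [loopA, hm, hxc, hcont]
            have hequiv' : ∀ y, y ∈ PySem.Set.add cur x ↔ y ∈ x :: acur := by
              intro y
              rw [PySem.Set.mem_add, hequiv y, List.mem_cons]
              tauto
            obtain ⟨hpres, hrel⟩ := ih (q ++ adj.getD x []) (PySem.Set.add cur x) (x :: acur) m hequiv'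
            refine ⟨fun y => by rw [hred]; exact hpres y, fun b hb => ?_⟩
            rw [bfsS_expand hst, if_neg hxa] at hb
            rw [hred]
            exact hrel b hb
        | false =>
          by_cases hsup : x ∈ sup
          · have hgd : adj.getD x [] = [] := PySem.Dict.getD_of_not_contains _ _ hcont
            have hst : statOf adj sup m x = .expand (adj.getD x []) := by
              rw [stat_none_eq hm, if_neg (by simp [hcont]), if_pos hsup, hgd]
            by_cases hxc : x ∈ cur
            · have hxa : x ∈ acur := (hequiv x).mp hxc
              refine ⟨fun y => by simp [loopA, hm, hxc], fun b hb => ?_⟩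
              rw [bfsS_expand hst, if_pos hxa] at hb
              injection hb with hb
              rw [← hb]; simp [loopA, hm, hxc]
            · have hxa : x ∉ acur := fun hmem => hxc ((hequiv x).mpr hmem)
              have hred : loopA adj sup (f + 1) (x :: q) cur m =
                  loopA adj sup f (q ++ adj.getD x []) (PySem.Set.add cur x) m := by
                simp [loopA, hm, hxc, hcont, hsup]
              have hequiv' : ∀ y, y ∈ PySem.Set.add cur x ↔ y ∈ x :: acur := by
                intro y
                rw [PySem.Set.mem_add, hequiv y, List.mem_cons]
                tauto
              obtain ⟨hpres, hrel⟩ := ih (q ++ adj.getD x []) (PySem.Set.add cur x) (x :: acur) m hequiv'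
              refine ⟨fun y => by rw [hred]; exact hpres y, fun b hb => ?_⟩
              rw [bfsS_expand hst, if_neg hxa] at hb
              rw [hred]
              exact hrel b hb
          · have hst : statOf adj sup m x = .fail := by
              rw [stat_none_eq hm, if_neg (by simp [hcont]), if_neg hsup]
            by_cases hxc : x ∈ cur
            · refine ⟨fun y => by simp [loopA, hm, hxc], fun b hb => ?_⟩
              rw [bfsS_fail hst] at hb
              injection hb with hb
              rw [← hb]; simp [loopA, hm, hxc]
            · have hred : loopA adj sup (f + 1) (x :: q) cur m = (false, m.insert x false) := by
                simp [loopA, hm, hxc, hcont, hsup]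
              refine ⟨fun y => ?_, fun b hb => ?_⟩
              · rw [hred]
                exact statOf_insert_false_missing hcont hsup hm y
              · rw [bfsS_fail hst] at hb
                injection hb with hb
                rw [← hb, hred]
      · -- can_make[x] = b'
        cases b' with
        | true =>
          have hst : statOf adj sup m x = .ok := stat_ok_of_get hm
          have hred : loopA adj sup (f + 1) (x :: q) cur m = loopA adj sup f q cur m := by
            simp [loopA, hm]
          obtain ⟨hpres, hrel⟩ := ih q cur acur m hequiv
          refine ⟨fun y => by rw [hred]; exact hpres y, fun b hb => ?_⟩
          rw [bfsS_ok hst] at hb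
          rw [hred]
          exact hrel b hb
        | false =>
          have hst : statOf adj sup m x = .fail := stat_fail_of_get hm
          refine ⟨fun y => by simp [loopA, hm], fun b hb => ?_⟩
          rw [bfsS_fail hst] at hb
          injection hb with hb
          rw [← hb]; simp [loopA, hm]

-- port B: branch reductions ------------------------------------------------------
theorem solveB_zero {adj : PySem.Dict String (List String)} {good bad seen : PySem.Set String}
    {node : String} : solveB adj good 0 node bad seen = (true, bad, seen) := by rw [solveB]

theorem allB_zero {adj : PySem.Dict String (List String)} {good bad seen : PySem.Set String}
    {l : List String} : allB adj good 0 l bad seen = (true, bad, seen) := by rw [allB]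

theorem solveB_good {adj : PySem.Dict String (List String)} {good bad seen : PySem.Set String}
    {f : Nat} {node : String} (hg : node ∈ good) :
    solveB adj good (f + 1) node bad seen = (true, bad, seen) := by
  rw [solveB]; simp [hg]

theorem solveB_stop {adj : PySem.Dict String (List String)} {good bad seen : PySem.Set String}
    {f : Nat} {node : String} (hg : node ∉ good) (hbs : node ∈ bad ∨ node ∈ seen) :
    solveB adj good (f + 1) node bad seen = (false, bad, seen) := by
  rw [solveB]; simp [hg, hbs]

theorem solveB_none {adj : PySem.Dict String (List String)} {good bad seen : PySem.Set String}
    {f : Nat} {node : String} (hg : node ∉ good) (hbs : ¬(node ∈ bad ∨ node ∈ seen))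
    (hA : adj.get? node = none) :
    solveB adj good (f + 1) node bad seen =
      (false, PySem.Set.add bad node, PySem.Set.add seen node) := by
  rw [solveB]; simp [hg, hbs, hA]

theorem solveB_nil {adj : PySem.Dict String (List String)} {good bad seen : PySem.Set String}
    {f : Nat} {node : String} (hg : node ∉ good) (hbs : ¬(node ∈ bad ∨ node ∈ seen))
    (hA : adj.get? node = some []) :
    solveB adj good (f + 1) node bad seen =
      (false, PySem.Set.add bad node, PySem.Set.add seen node) := by
  rw [solveB]; simp [hg, hbs, hA]

theorem solveB_go {adj : PySem.Dict String (List String)} {good bad seen : PySem.Set String}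
    {f : Nat} {node : String} {subs : List String} (hg : node ∉ good)
    (hbs : ¬(node ∈ bad ∨ node ∈ seen)) (hA : adj.get? node = some subs) (hs : subs ≠ []) :
    solveB adj good (f + 1) node bad seen =
      allB adj good f subs bad (PySem.Set.add seen node) := by
  rw [solveB]; simp [hg, hbs, hA, hs]

theorem allB_nil {adj : PySem.Dict String (List String)} {good bad seen : PySem.Set String}
    {f : Nat} : allB adj good (f + 1) [] bad seen = (true, bad, seen) := by rw [allB]

theorem allB_cons {adj : PySem.Dict String (List String)} {good bad seen : PySem.Set String}
    {f : Nat} {x : String} {rest : List String} :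
    allB adj good (f + 1) (x :: rest) bad seen =
      match solveB adj good f x bad seen with
      | (true, bad', seen') => allB adj good f rest bad' seen'
      | r => r := by rw [allB]

-- port B computes the abstract DFS -----------------------------------------------
theorem BAbs (adj : PySem.Dict String (List String)) (good : PySem.Set String) :
    ∀ f : Nat,
      (∀ (node : String) (bad seen : PySem.Set String) (aseen : List String),
        (∀ y, y ∈ seen ↔ y ∈ aseen) →
        (∀ x, statB adj good (solveB adj good f node bad seen).2.1 x = statB adj good bad x) ∧
        (∀ b v, dM (statB adj good bad) f node aseen = some (b, v) →
          (solveB adj good f node bad seen).1 = b ∧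
            (b = true → ∀ y, y ∈ (solveB adj good f node bad seen).2.2 ↔ y ∈ v))) ∧
      (∀ (l : List String) (bad seen : PySem.Set String) (aseen : List String),
        (∀ y, y ∈ seen ↔ y ∈ aseen) →
        (∀ x, statB adj good (allB adj good f l bad seen).2.1 x = statB adj good bad x) ∧
        (∀ b v, aM (statB adj good bad) f l aseen = some (b, v) →
          (allB adj good f l bad seen).1 = b ∧
            (b = true → ∀ y, y ∈ (allB adj good f l bad seen).2.2 ↔ y ∈ v))) := by
  intro f
  induction f with
  | zero =>
    constructor
    · intro node bad seen aseen hsim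
      rw [solveB_zero]
      exact ⟨fun x => rfl, fun b v hb => by rw [dM_zero] at hb; cases hb⟩
    · intro l bad seen aseen hsim
      rw [allB_zero]
      exact ⟨fun x => rfl, fun b v hb => by rw [aM_zero] at hb; cases hb⟩
  | succ f ih =>
    obtain ⟨ihd, iha⟩ := ih
    constructor
    · intro node bad seen aseen hsim
      by_cases hg : node ∈ good
      · rw [solveB_good hg]
        refine ⟨fun x => rfl, fun b v hb => ?_⟩
        rw [dM_ok (statB_of_good hg)] at hb
        injection hb with hb
        rw [Prod.mk.injEq] at hb
        obtain ⟨hb1, hv⟩ := hb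
        exact ⟨hb1, fun _ y => by rw [← hv]; exact hsim y⟩
      · by_cases hbs : node ∈ bad ∨ node ∈ seen
        · rw [solveB_stop hg hbs]
          refine ⟨fun x => rfl, fun b v hb => ?_⟩
          have hfalse : dM (statB adj good bad) (f + 1) node aseen = some (false, aseen) := by
            by_cases hb' : node ∈ bad
            · rw [dM_fail (statB_of_bad hg hb')]
            · have hs' : node ∈ seen := by tauto
              rcases hA : adj.get? node with _ | subs
              · rw [dM_fail (statB_of_none hg hb' hA)]
              · by_cases hsub : subs = []
                · subst hsub
                  rw [dM_fail (statB_of_nil hg hb' hA)]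
                · rw [dM_expand (statB_of_subs hg hb' hA hsub),
                    if_pos ((hsim node).mp hs')]
          rw [hfalse] at hb
          injection hb with hb
          rw [Prod.mk.injEq] at hb
          obtain ⟨hb1, -⟩ := hb
          exact ⟨hb1, fun ht => absurd (hb1.trans ht) (by simp)⟩
        · have hnb : node ∉ bad := fun h => hbs (Or.inl h)
          have hns : node ∉ seen := fun h => hbs (Or.inr h)
          have hna : node ∉ aseen := fun h => hns ((hsim node).mpr h)
          rcases hA : adj.get? node with _ | subs
          · rw [solveB_none hg hbs hA]
            have hst : statB adj good bad node = .fail := statB_of_none hg hnb hA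
            refine ⟨statB_add_bad_fail hg hst, fun b v hb => ?_⟩
            rw [dM_fail hst] at hb
            injection hb with hb
            rw [Prod.mk.injEq] at hb
            obtain ⟨hb1, -⟩ := hb
            exact ⟨hb1, fun ht => absurd (hb1.trans ht) (by simp)⟩
          · by_cases hsub : subs = []
            · subst hsub
              rw [solveB_nil hg hbs hA]
              have hst : statB adj good bad node = .fail := statB_of_nil hg hnb hA
              refine ⟨statB_add_bad_fail hg hst, fun b v hb => ?_⟩
              rw [dM_fail hst] at hb
              injection hb with hb
              rw [Prod.mk.injEq] at hb
              obtain ⟨hb1, -⟩ := hb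
              exact ⟨hb1, fun ht => absurd (hb1.trans ht) (by simp)⟩
            · rw [solveB_go hg hbs hA hsub]
              have hst : statB adj good bad node = .expand subs := statB_of_subs hg hnb hA hsub
              have hsim' : ∀ y, y ∈ PySem.Set.add seen node ↔ y ∈ node :: aseen := by
                intro y
                rw [PySem.Set.mem_add, List.mem_cons, hsim y]
                tauto
              obtain ⟨hpres, hrel⟩ := iha subs bad (PySem.Set.add seen node) (node :: aseen) hsim'
              refine ⟨hpres, fun b v hb => ?_⟩
              rw [dM_expand hst, if_neg hna] at hb
              exact hrel b v hb
    · intro l bad seen aseen hsim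
      cases l with
      | nil =>
        rw [allB_nil]
        refine ⟨fun x => rfl, fun b v hb => ?_⟩
        rw [aM_nil] at hb
        injection hb with hb
        rw [Prod.mk.injEq] at hb
        obtain ⟨hb1, hv⟩ := hb
        exact ⟨hb1, fun _ y => by rw [← hv]; exact hsim y⟩
      | cons x rest =>
        rw [allB_cons]
        obtain ⟨presS, relS⟩ := ihd x bad seen aseen hsim
        rcases hs : solveB adj good f x bad seen with ⟨b1, bad1, seen1⟩
        have presS' : ∀ z, statB adj good bad1 z = statB adj good bad z := by
          intro z
          have := presS z
          rw [hs] at this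
          exact this
        constructor
        · intro z
          cases b1 with
          | false => simpa using presS' z
          | true =>
            simp only
            obtain ⟨presR, -⟩ := iha rest bad1 seen1 seen1 (fun y => Iff.rfl)
            exact (presR z).trans (presS' z)
        · intro b v hb
          rw [aM_cons] at hb
          rcases hd : dM (statB adj good bad) f x aseen with _ | ⟨bb, v1⟩
          · rw [hd] at hb; cases hb
          · rw [hd] at hb
            obtain ⟨hb1eq, hseen⟩ := relS bb v1 hd
            rw [hs] at hb1eq hseen
            simp only at hb1eq hseen
            cases bb with
            | false =>
              subst hb1eq
              simp only at hb
              injection hb with hb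
              rw [Prod.mk.injEq] at hb
              obtain ⟨hbf, -⟩ := hb
              exact ⟨hbf, fun ht => absurd (hbf.trans ht) (by simp)⟩
            | true =>
              subst hb1eq
              simp only at hb
              have hsim2 : ∀ y, y ∈ seen1 ↔ y ∈ v1 := hseen rfl
              have hfun : statB adj good bad1 = statB adj good bad := funext presS'
              obtain ⟨presR, relR⟩ := iha rest bad1 seen1 v1 hsim2
              rw [hfun] at relR
              exact relR b v hb

-- the two adjacency builds -------------------------------------------------------
-- A's dict never stores an empty list; B's stores one exactly for recipes all of whose
-- zipped ingredient lists are empty.  This is the precise relation between them: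
def RelAdj (dA dB : PySem.Dict String (List String)) : Prop :=
  ∀ x, dA.get? x = (dB.get? x).bind (fun l => if l = [] then none else some l)

theorem relAdj_getD {dA dB : PySem.Dict String (List String)} (h : RelAdj dA dB)
    (r : String) : dA.getD r [] = dB.getD r [] := by
  have hr := h r
  rcases hB : dB.get? r with _ | l
  · have hr' : dA.get? r = none := by rw [hB] at hr; exact hr
    simp [PySem.Dict.getD_eq_get?_getD, hr', hB]
  · have hr' : dA.get? r = if l = [] then none else some l := by rw [hB] at hr; exact hr
    by_cases hl : l = []
    · subst hl
      rw [if_pos rfl] at hr'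
      simp [PySem.Dict.getD_eq_get?_getD, hr', hB]
    · rw [if_neg hl] at hr'
      simp [PySem.Dict.getD_eq_get?_getD, hr', hB]

theorem foldA_inner (r : String) :
    ∀ (ings : List String) (d : PySem.Dict String (List String)),
      ings.foldl (fun d ing => d.insert r (d.getD r [] ++ [ing])) d =
        if ings = [] then d else d.insert r (d.getD r [] ++ ings) := by
  intro ings
  induction ings with
  | nil => intro d; simp
  | cons a as ih =>
    intro d
    rw [List.foldl_cons, ih]
    by_cases ha : as = []
    · subst ha
      simp
    · rw [if_neg ha, if_neg (by simp)]
      rw [PySem.Dict.getD_insert_self, PySem.Dict.insert_insert_self]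
      rw [List.append_assoc, List.singleton_append]

theorem relAdj_step {dA dB : PySem.Dict String (List String)} (h : RelAdj dA dB)
    (p : String × List String) :
    RelAdj (p.2.foldl (fun d ing => d.insert p.1 (d.getD p.1 [] ++ [ing])) dA)
           (dB.insert p.1 (dB.getD p.1 [] ++ p.2)) := by
  obtain ⟨r, ings⟩ := p
  intro x
  simp only
  rw [foldA_inner]
  by_cases hx : x = r
  · subst hx
    rw [PySem.Dict.get?_insert_self]
    show (if ings = [] then dA else dA.insert x (dA.getD x [] ++ ings)).get? x
        = if dB.getD x [] ++ ings = [] then none else some (dB.getD x [] ++ ings)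
    by_cases hi : ings = []
    · subst hi
      rw [if_pos rfl, List.append_nil]
      have hr := h x
      rcases hB : dB.get? x with _ | l
      · have hr' : dA.get? x = none := by rw [hB] at hr; exact hr
        have hgd : dB.getD x [] = [] := by simp [PySem.Dict.getD_eq_get?_getD, hB]
        rw [hgd, if_pos rfl, hr']
      · have hr' : dA.get? x = if l = [] then none else some l := by rw [hB] at hr; exact hr
        have hgd : dB.getD x [] = l := by simp [PySem.Dict.getD_eq_get?_getD, hB]
        rw [hgd, hr']
    · rw [if_neg hi, PySem.Dict.get?_insert_self]
      have hne : dB.getD x [] ++ ings ≠ [] := by simp [hi]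
      rw [if_neg hne, relAdj_getD h x]
  · rw [PySem.Dict.get?_insert_of_ne _ _ hx]
    by_cases hi : ings = []
    · rw [if_pos hi]
      exact h x
    · rw [if_neg hi, PySem.Dict.get?_insert_of_ne _ _ hx]
      exact h x

theorem relAdj_fold :
    ∀ (ps : List (String × List String)) (dA dB : PySem.Dict String (List String)),
      RelAdj dA dB →
      RelAdj (ps.foldl (fun d p => p.2.foldl
                (fun d ing => d.insert p.1 (d.getD p.1 [] ++ [ing])) d) dA)
             (ps.foldl (fun d p => d.insert p.1 (d.getD p.1 [] ++ p.2)) dB) := by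
  intro ps
  induction ps with
  | nil => intro dA dB h; exact h
  | cons p ps ih =>
    intro dA dB h
    rw [List.foldl_cons, List.foldl_cons]
    exact ih _ _ (relAdj_step h p)

theorem relAdj_adj (recipes : List String) (ingredients : List (List String))
    (h : recipes.length ≤ ingredients.length) :
    RelAdj (adjA recipes ingredients) (adjB recipes ingredients) := by
  have hzip : recipes.zip ingredients =
      (List.range recipes.length).map (fun i => (recipes.getD i "", ingredients.getD i [])) := by
    apply List.ext_getElem
    · simp [List.length_zip]
      omega
    · intro i h1 h2
      have hi : i < recipes.length := by simp [List.length_zip] at h1; omega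
      have hi2 : i < ingredients.length := lt_of_lt_of_le hi h
      simp [List.getElem_zip, List.getD_eq_getElem?_getD, hi, hi2]
  have hA : adjA recipes ingredients =
      (recipes.zip ingredients).foldl (fun d p => p.2.foldl
        (fun d ing => d.insert p.1 (d.getD p.1 [] ++ [ing])) d) PySem.Dict.empty := by
    unfold adjA
    rw [hzip, List.foldl_map]
  rw [hA]
  unfold adjB
  apply relAdj_fold
  intro x
  simp

-- bookkeeping lemmas ---------------------------------------------------------------
theorem get?_fold_insert_true :
    ∀ (l : List String) (m : PySem.Dict String Bool) (x : String),
      (l.foldl (fun m s => m.insert s true) m).get? x = if x ∈ l then some true else m.get? x := by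
  intro l
  induction l with
  | nil => intro m x; simp
  | cons a l ih =>
    intro m x
    rw [List.foldl_cons, ih]
    by_cases hx : x ∈ l <;> by_cases hxa : x = a <;>
      simp [List.mem_cons, hx, hxa, PySem.Dict.get?_insert]

theorem loopA_missing {adj : PySem.Dict String (List String)} {sup : List String}
    {m : PySem.Dict String Bool} {r : String} (f : Nat)
    (h1 : adj.contains r = false) (h2 : r ∉ sup) (h3 : m.get? r = none) :
    loopA adj sup (f + 1) [r] PySem.Set.empty m = (false, m.insert r false) := by
  simp [loopA, h3, h1, h2, PySem.Set.empty]

theorem contains_get?_none {m : PySem.Dict String Bool} {r : String}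
    (h : m.contains r = false) : m.get? r = none := by
  have h2 := PySem.Dict.contains_eq_isSome_get? (d := m) (k := r)
  rw [h] at h2
  exact Option.not_isSome_iff_eq_none.mp (by rw [← h2]; simp)

-- A memoized ok iff B memoized good, given equal statuses
theorem statOf_ok_iff {adj : PySem.Dict String (List String)} {sup : List String}
    {m : PySem.Dict String Bool} {x : String} :
    statOf adj sup m x = .ok ↔ m.get? x = some true := by
  constructor
  · intro h
    rcases hm : m.get? x with _ | b
    · rw [stat_none_eq hm] at h
      split_ifs at h <;> cases h
    · cases b
      · rw [stat_fail_of_get hm] at h; cases h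
      · rfl
  · exact stat_ok_of_get

-- the final filter predicates agree pointwise under equal statuses
theorem pred_eq_of_stat_eq {adjA' adjB' : PySem.Dict String (List String)} {sup : List String}
    {mA : PySem.Dict String Bool} {good bad : List String} {r : String}
    (h : statOf adjA' sup mA r = statB adjB' good bad r) :
    mA.getD r false = PySem.Set.contains good r := by
  have hgood : mA.get? r = some true ↔ r ∈ good := by
    rw [← statOf_ok_iff (adj := adjA') (sup := sup), h, statB_ok_iff]
  rcases hm : mA.get? r with _ | b
  · have hng : r ∉ good := fun hgd => by
      have := hgood.mpr hgd
      rw [hm] at this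
      cases this
    have hc : PySem.Set.contains good r = false := by
      cases hc : PySem.Set.contains good r with
      | false => rfl
      | true => exact absurd ((PySem.Set.contains_iff _ _).mp hc) hng
    rw [hc]
    simp [PySem.Dict.getD_eq_get?_getD, hm]
  · cases b with
    | false =>
      have hng : r ∉ good := fun hgd => by
        have := hgood.mpr hgd
        rw [hm] at this
        cases this
      have hc : PySem.Set.contains good r = false := by
        cases hc : PySem.Set.contains good r with
        | false => rfl
        | true => exact absurd ((PySem.Set.contains_iff _ _).mp hc) hng
      rw [hc]
      simp [PySem.Dict.getD_eq_get?_getD, hm]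
    | true =>
      have hgd : r ∈ good := hgood.mp hm
      have hc : PySem.Set.contains good r = true := (PySem.Set.contains_iff _ _).mpr hgd
      rw [hc]
      simp [PySem.Dict.getD_eq_get?_getD, hm]

-- one outer-loop step preserves equal statuses
theorem step_inv (adjA' adjB' : PySem.Dict String (List String)) (sup : List String)
    (supLen : Nat) (mA : PySem.Dict String Bool) (good bad : PySem.Set String) (r : String)
    (hinv : ∀ x, statOf adjA' sup mA x = statB adjB' good bad x) :
    ∀ x, statOf adjA' sup
        (if mA.contains r then mA
         else
           (loopA adjA' sup (pvFuel adjA' sup.length) [r] PySem.Set.empty mA).2.insert r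
             (loopA adjA' sup (pvFuel adjA' sup.length) [r] PySem.Set.empty mA).1) x
      = statB adjB'
          (if r ∉ good ∧ r ∉ bad then
            (if (solveB adjB' good (pvFuel adjB' supLen) r bad PySem.Set.empty).1 then
              (PySem.Set.add good r,
               (solveB adjB' good (pvFuel adjB' supLen) r bad PySem.Set.empty).2.1)
            else
              (good, PySem.Set.add
                (solveB adjB' good (pvFuel adjB' supLen) r bad PySem.Set.empty).2.1 r))
           else (good, bad)).1
          (if r ∉ good ∧ r ∉ bad then
            (if (solveB adjB' good (pvFuel adjB' supLen) r bad PySem.Set.empty).1 then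
              (PySem.Set.add good r,
               (solveB adjB' good (pvFuel adjB' supLen) r bad PySem.Set.empty).2.1)
            else
              (good, PySem.Set.add
                (solveB adjB' good (pvFuel adjB' supLen) r bad PySem.Set.empty).2.1 r))
           else (good, bad)).2 x := by
  intro x
  by_cases hA : mA.contains r = true <;> by_cases hB : r ∉ good ∧ r ∉ bad
  · -- A memoized, B runs
    rw [if_pos hA, if_pos hB]
    obtain ⟨hg, hb⟩ := hB
    have hgA : ∃ b, mA.get? r = some b := by
      apply Option.isSome_iff_exists.mp
      rw [← PySem.Dict.contains_eq_isSome_get?, hA]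
    obtain ⟨b', hgAv⟩ := hgA
    have hbf : b' = false := by
      cases b' with
      | false => rfl
      | true =>
        exfalso
        have hok : statB adjB' good bad r = .ok := by
          rw [← hinv r]
          exact stat_ok_of_get hgAv
        exact hg (statB_ok_iff.mp hok)
    subst hbf
    have hstB : statB adjB' good bad r = .fail := by
      rw [← hinv r]
      exact stat_fail_of_get hgAv
    have hbs : ¬(r ∈ bad ∨ r ∈ PySem.Set.empty) := by
      simp [PySem.Set.empty, hb]
    rcases hfe : pvFuel adjB' supLen with _ | g
    · exfalso; unfold pvFuel at hfe; omega
    · have hred : solveB adjB' good (g + 1) r bad PySem.Set.empty =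
          (false, PySem.Set.add bad r, PySem.Set.add PySem.Set.empty r) := by
        rcases statB_fail_cases hg hb hstB with hN | hNil
        · exact solveB_none hg hbs hN
        · exact solveB_nil hg hbs hNil
      rw [hred]
      simp only [Bool.false_eq_true, if_false]
      have hadd : PySem.Set.add (PySem.Set.add bad r) r = PySem.Set.add bad r :=
        PySem.Set.add_of_mem ((PySem.Set.mem_add _ _ _).mpr (Or.inr rfl))
      rw [hadd]
      by_cases hx : x = r
      · subst hx
        rw [stat_fail_of_get hgAv, statB_of_bad hg ((PySem.Set.mem_add _ _ _).mpr (Or.inr rfl))]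
      · rw [statB_add_bad_ne hx]
        exact hinv x
  · -- A memoized, B memoized
    rw [if_pos hA, if_neg hB]
    exact hinv x
  · -- A runs, B runs
    rw [if_neg (by simp [hA]), if_pos hB]
    obtain ⟨hg, hb⟩ := hB
    have hmA : mA.get? r = none := contains_get?_none (by simpa using hA)
    have hsomeA : (bfsS (statOf adjA' sup mA) (pvFuel adjA' sup.length) [r] []).isSome :=
      bfsS_suff (fun y cs hy => statOf_hU hy) _ _ _
        (by simpa using fuel_bound adjA' sup _)
    obtain ⟨b1, hb1⟩ := Option.isSome_iff_exists.mp hsomeA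
    have hsomeB : (dM (statB adjB' good bad) (pvFuel adjB' supLen) r []).isSome := by
      apply (dM_aM_suff (st := statB adjB' good bad) (U := adjB'.keys)
        (C := (adjB'.values.map List.length).sum)
        (fun y cs hy => statB_hU hy) (pvFuel adjB' supLen)).1
      have := fuel_bound_B adjB' supLen (statB adjB' good bad)
      omega
    obtain ⟨⟨b2, v⟩, hb2⟩ := Option.isSome_iff_exists.mp hsomeB
    have hstfun : statOf adjA' sup mA = statB adjB' good bad := funext hinv
    have hb1' : bfsS (statB adjB' good bad) (pvFuel adjA' sup.length) [r] [] = some b1 := by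
      rw [← hstfun]
      exact hb1
    have hb12 : b1 = b2 := bfs_eq_dM hb1' hb2
    obtain ⟨hpresA, hrelA⟩ := loopA_abs adjA' sup (pvFuel adjA' sup.length) [r]
      PySem.Set.empty [] mA (fun y => by simp [PySem.Set.empty])
    obtain ⟨hpresB, hrelB⟩ := (BAbs adjB' good (pvFuel adjB' supLen)).1 r bad
      PySem.Set.empty [] (fun y => by simp [PySem.Set.empty])
    have hbA : (loopA adjA' sup (pvFuel adjA' sup.length) [r] PySem.Set.empty mA).1 = b1 :=
      hrelA b1 hb1
    have hbB : (solveB adjB' good (pvFuel adjB' supLen) r bad PySem.Set.empty).1 = b2 :=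
      (hrelB b2 v hb2).1
    by_cases hx : x = r
    · subst hx
      rw [hbB, ← hb12]
      cases b1 with
      | true =>
        simp only [if_true]
        have : statOf adjA' sup
            ((loopA adjA' sup (pvFuel adjA' sup.length) [x] PySem.Set.empty mA).2.insert x
              (loopA adjA' sup (pvFuel adjA' sup.length) [x] PySem.Set.empty mA).1) x = .ok := by
          apply stat_ok_of_get
          rw [PySem.Dict.get?_insert_self, hbA]
        rw [this, statB_of_good ((PySem.Set.mem_add _ _ _).mpr (Or.inr rfl))]
      | false =>
        simp only [Bool.false_eq_true, if_false]
        have : statOf adjA' sup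
            ((loopA adjA' sup (pvFuel adjA' sup.length) [x] PySem.Set.empty mA).2.insert x
              (loopA adjA' sup (pvFuel adjA' sup.length) [x] PySem.Set.empty mA).1) x = .fail := by
          apply stat_fail_of_get
          rw [PySem.Dict.get?_insert_self, hbA]
        rw [this, statB_of_bad hg ((PySem.Set.mem_add _ _ _).mpr (Or.inr rfl))]
    · rw [statOf_insert_of_ne _ hx]
      have hL : statOf adjA' sup
            (loopA adjA' sup (pvFuel adjA' sup.length) [r] PySem.Set.empty mA).2 x
          = statB adjB' good
            (solveB adjB' good (pvFuel adjB' supLen) r bad PySem.Set.empty).2.1 x :=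
        ((hpresA x).trans (hinv x)).trans (hpresB x).symm
      rw [hbB, ← hb12]
      cases b1 with
      | true =>
        simp only [if_true]
        rw [statB_add_good_ne hx]
        exact hL
      | false =>
        simp only [Bool.false_eq_true, if_false]
        rw [statB_add_bad_ne hx]
        exact hL
  · -- A runs, B memoized
    rw [if_neg (by simp [hA]), if_neg hB]
    have hmA : mA.get? r = none := contains_get?_none (by simpa using hA)
    have hrg : r ∈ good ∨ r ∈ bad := by tauto
    have hng : r ∉ good := by
      intro hgd
      have hok : statOf adjA' sup mA r = .ok := by
        rw [hinv r]
        exact statB_of_good hgd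
      have := statOf_ok_iff.mp hok
      rw [hmA] at this
      cases this
    have hbd : r ∈ bad := by tauto
    have hstA : statOf adjA' sup mA r = .fail := by
      rw [hinv r]
      exact statB_of_bad hng hbd
    rw [stat_none_eq hmA] at hstA
    have hcont : adjA'.contains r = false := by
      by_cases hc : adjA'.contains r
      · rw [if_pos hc] at hstA; cases hstA
      · simpa using hc
    have hsup : r ∉ sup := by
      intro hs
      rw [if_neg (by simp [hcont]), if_pos hs] at hstA
      cases hstA
    rcases hfe : pvFuel adjA' sup.length with _ | g
    · exfalso; unfold pvFuel at hfe; omega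
    · rw [loopA_missing g hcont hsup hmA]
      simp only
      rw [PySem.Dict.insert_insert_self]
      by_cases hx : x = r
      · subst hx
        rw [stat_fail_of_get (PySem.Dict.get?_insert_self _ _ _),
          statB_of_bad hng hbd]
      · rw [statOf_insert_of_ne _ hx]
        exact hinv x

-- the whole outer loops preserve equal statuses
theorem outer_inv (adjA' adjB' : PySem.Dict String (List String)) (sup : List String)
    (supLen : Nat) :
    ∀ (rs : List String) (mA : PySem.Dict String Bool) (gb : PySem.Set String × PySem.Set String),
      (∀ x, statOf adjA' sup mA x = statB adjB' gb.1 gb.2 x) →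
      ∀ x, statOf adjA' sup
          (rs.foldl (fun m recipe =>
            if m.contains recipe then m
            else
              let p := loopA adjA' sup (pvFuel adjA' sup.length) [recipe] PySem.Set.empty m
              p.2.insert recipe p.1) mA) x
        = statB adjB'
            (rs.foldl (fun gb r =>
              if r ∉ gb.1 ∧ r ∉ gb.2 then
                let p := solveB adjB' gb.1 (pvFuel adjB' supLen) r gb.2 PySem.Set.empty
                if p.1 then (PySem.Set.add gb.1 r, p.2.1) else (gb.1, PySem.Set.add p.2.1 r)
              else gb) gb).1
            (rs.foldl (fun gb r =>
              if r ∉ gb.1 ∧ r ∉ gb.2 then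
                let p := solveB adjB' gb.1 (pvFuel adjB' supLen) r gb.2 PySem.Set.empty
                if p.1 then (PySem.Set.add gb.1 r, p.2.1) else (gb.1, PySem.Set.add p.2.1 r)
              else gb) gb).2 x := by
  intro rs
  induction rs with
  | nil => intro mA gb hinv x; exact hinv x
  | cons r rs ih =>
    intro mA gb hinv x
    rw [List.foldl_cons, List.foldl_cons]
    exact ih _ _ (step_inv adjA' adjB' sup supLen mA gb.1 gb.2 r hinv) x

-- initial states have equal statuses
theorem init_stat (recipes : List String) (ingredients : List (List String))
    (supplies : List String) (h : recipes.length ≤ ingredients.length) :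
    ∀ x, statOf (adjA recipes ingredients) (PySem.Set.ofList supplies)
           ((PySem.Set.ofList supplies).foldl (fun m s => m.insert s true) PySem.Dict.empty) x
       = statB (adjB recipes ingredients) (PySem.Set.ofList supplies) PySem.Set.empty x := by
  intro x
  have hrel := relAdj_adj recipes ingredients h
  by_cases hx : x ∈ PySem.Set.ofList supplies
  · have hmA : ((PySem.Set.ofList supplies).foldl (fun m s => m.insert s true)
        PySem.Dict.empty).get? x = some true := by
      rw [get?_fold_insert_true]
      simp [hx]
    rw [stat_ok_of_get hmA, statB_of_good hx]
  · have hmA : ((PySem.Set.ofList supplies).foldl (fun m s => m.insert s true)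
        PySem.Dict.empty).get? x = none := by
      rw [get?_fold_insert_true]
      simp [hx]
    have hbad : x ∉ PySem.Set.empty := by simp [PySem.Set.empty]
    rw [stat_none_eq hmA]
    have hr := hrel x
    rcases hB : (adjB recipes ingredients).get? x with _ | l
    · have hr' : (adjA recipes ingredients).get? x = none := by rw [hB] at hr; exact hr
      have hcont : (adjA recipes ingredients).contains x = false := by
        rw [PySem.Dict.contains_eq_isSome_get?, hr']
        rfl
      rw [if_neg (by simp [hcont]), if_neg hx, statB_of_none hx hbad hB]
    · have hr' : (adjA recipes ingredients).get? x = if l = [] then none else some l := by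
        rw [hB] at hr; exact hr
      by_cases hl : l = []
      · subst hl
        rw [if_pos rfl] at hr'
        have hcont : (adjA recipes ingredients).contains x = false := by
          rw [PySem.Dict.contains_eq_isSome_get?, hr']
          rfl
        rw [if_neg (by simp [hcont]), if_neg hx, statB_of_nil hx hbad hB]
      · rw [if_neg hl] at hr'
        have hcont : (adjA recipes ingredients).contains x = true := by
          rw [PySem.Dict.contains_eq_isSome_get?, hr']
          rfl
        have hgd : (adjA recipes ingredients).getD x [] = l :=
          PySem.Dict.getD_of_get?_eq_some _ _ hr'
        rw [if_pos hcont, hgd, statB_of_subs hx hbad hB hl]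

theorem main_equiv (recipes : List String) (ingredients : List (List String))
    (supplies : List String) (h : recipes.length ≤ ingredients.length) :
    bfs_iter recipes ingredients supplies = bfs_iter_alt recipes ingredients supplies := by
  simp only [bfs_iter, bfs_iter_alt]
  apply List.filter_congr
  intro r hr
  apply pred_eq_of_stat_eq
  exact outer_inv (adjA recipes ingredients) (adjB recipes ingredients)
    (PySem.Set.ofList supplies) supplies.length recipes _
    (PySem.Set.ofList supplies, PySem.Set.empty)
    (init_stat recipes ingredients supplies h) r

-- ===== VERDICT (by name: the statement is the Claim_ definition above) =====
theorem bfs_iter_spec : Claim_equal_bfs_iter := by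
  intro recipes ingredients supplies _ hpre
  unfold Spec_bfs_iter
  exact main_equiv recipes ingredients supplies hpre
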